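-- pv_equiv track=rewrite | github.com/mm/advent_of_code_2022 | day_nine/main.py | find_adjacent_position
-- ===== SOURCE A (Python) =====
-- from typing import List, Tuple
--
-- HORIZONTAL_MOVES = {
--     "R": lambda x, y: (x+1, y),
--     "L": lambda x, y: (x-1, y),
-- }
--
-- VERTICAL_MOVES = {
--     "U": lambda x, y: (x, y+1),
--     "D": lambda x, y: (x, y-1),
-- }
--
-- DIAGONAL_MOVES = {
--     "UR": lambda x, y: (x+1, y+1),
--     "UL": lambda x, y: (x-1, y+1),
--     "DR": lambda x, y: (x+1, y-1),
--     "DL": lambda x, y: (x-1, y-1)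
-- }
--
-- def tail_adjacent_to_head(head_x: int, head_y: int, tail_x: int, tail_y: int):
--     """
--     Is the tail adjacent to the head in 2D space? (touching diagonally
--     counts as adjacency, so does overlapping)
--     """
--
--     if (head_x, head_y) == (tail_x, tail_y):
--         # overlapping
--         return True
--
--     if ((tail_x + 1 == head_x) or (tail_x - 1 == head_x)) and (tail_y == head_y):
--         # adjacent horizontally
--         return True
--
--     if ((tail_y + 1 == head_y) or (tail_y - 1 == head_y)) and (tail_x == head_x):
--         # adjacent vertically
--         return True
--
--     if (tail_x + 1, tail_y + 1) == (head_x, head_y):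
--         # adjacent diagonally
--         return True
--
--     if (tail_x - 1, tail_y - 1) == (head_x, head_y):
--         # adjacent diagonally
--         return True
--
--     if (tail_x + 1, tail_y - 1) == (head_x, head_y):
--         # adjacent diagonally
--         return True
--
--     if (tail_x - 1, tail_y + 1) == (head_x, head_y):
--         # adjacent diagonally
--         return True
--
--     return False
--
-- def find_adjacent_position(head_x: int, head_y: int, tail_x: int, tail_y: int) -> Tuple[int, int]:
--     """
--     Super naively try to figure out a new position for the tail that
--     will make it adjacent to the head.
--     """
--
--     in_same_column = head_x == tail_x
--     in_same_row = head_y == tail_y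
--
--     if in_same_row:
--         allowed_moves = HORIZONTAL_MOVES
--     elif in_same_column:
--         allowed_moves = VERTICAL_MOVES
--     else:
--         allowed_moves = DIAGONAL_MOVES
--
--     for move, mover in allowed_moves.items():
--         new_tail_x, new_tail_y = mover(tail_x, tail_y)
--         is_adjacent = tail_adjacent_to_head(head_x, head_y, new_tail_x, new_tail_y)
--
--         if is_adjacent:
--             return (new_tail_x, new_tail_y)
--
--     # One of these should have made us adjacent. If we reach here, something happened:
--     raise ValueError("There's no way to make the head and tail adjacent")
-- ===== SOURCE B (Python) =====
-- def find_adjacent_position(head_x, head_y, tail_x, tail_y):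
--     """Closed-form tail step: move one cell in the direction of the head."""
--     dx = head_x - tail_x
--     dy = head_y - tail_y
--     if abs(dx) > 2 or abs(dy) > 2:
--         raise ValueError("There's no way to make the head and tail adjacent")
--     if dy == 0:
--         return (tail_x + (1 if dx >= 0 else -1), tail_y)
--     if dx == 0:
--         return (tail_x, tail_y + (1 if dy > 0 else -1))
--     return (tail_x + (1 if dx > 0 else -1), tail_y + (1 if dy > 0 else -1))
-- ===== Notes on version B (the rewrite author's own statement) =====
-- stated objective: simpler
-- what changed: Replaces the search over candidate move lambdas with an adjacency check by a closed-form computation of the one-cell step toward the head from the signs of dx and dy.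
import Mathlib
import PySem

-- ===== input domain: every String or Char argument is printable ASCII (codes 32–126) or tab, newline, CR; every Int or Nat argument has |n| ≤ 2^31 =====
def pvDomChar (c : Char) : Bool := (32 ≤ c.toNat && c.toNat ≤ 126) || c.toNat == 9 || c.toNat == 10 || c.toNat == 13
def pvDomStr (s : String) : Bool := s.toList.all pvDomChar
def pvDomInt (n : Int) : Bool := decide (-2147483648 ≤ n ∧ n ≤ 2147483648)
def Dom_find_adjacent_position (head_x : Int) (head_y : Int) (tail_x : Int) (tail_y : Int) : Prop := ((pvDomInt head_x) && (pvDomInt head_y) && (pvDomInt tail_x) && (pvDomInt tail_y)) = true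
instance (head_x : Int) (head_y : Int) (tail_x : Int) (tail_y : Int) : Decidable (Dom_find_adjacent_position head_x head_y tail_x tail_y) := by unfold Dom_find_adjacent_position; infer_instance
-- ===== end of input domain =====

-- B replaces A's search over candidate move lambdas with a closed-form one-step-towards-head
-- computation (objective: simpler).  Equivalence is on return values; on inputs where A raises
-- ValueError, B raises too (those inputs are outside Pre_).

-- ===== PORT A =====

-- port of the helper tail_adjacent_to_head, branch for branch
def tail_adjacent_to_head (head_x : Int) (head_y : Int) (tail_x : Int) (tail_y : Int) : Bool :=
  if head_x == tail_x && head_y == tail_y then true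
  else if (tail_x + 1 == head_x || tail_x - 1 == head_x) && tail_y == head_y then true
  else if (tail_y + 1 == head_y || tail_y - 1 == head_y) && tail_x == head_x then true
  else if tail_x + 1 == head_x && tail_y + 1 == head_y then true
  else if tail_x - 1 == head_x && tail_y - 1 == head_y then true
  else if tail_x + 1 == head_x && tail_y - 1 == head_y then true
  else if tail_x - 1 == head_x && tail_y + 1 == head_y then true
  else false

-- the for-loop over allowed_moves.items(): first mover whose result is adjacent;
-- the empty case is A's `raise ValueError` (outside Pre_), modelled as (0, 0)
def fapLoop (head_x : Int) (head_y : Int) (tail_x : Int) (tail_y : Int) :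
    List (Int → Int → Int × Int) → Int × Int
  | [] => (0, 0)
  | mover :: rest =>
      let nt := mover tail_x tail_y
      if tail_adjacent_to_head head_x head_y nt.1 nt.2 then nt
      else fapLoop head_x head_y tail_x tail_y rest

def find_adjacent_position (head_x : Int) (head_y : Int) (tail_x : Int) (tail_y : Int) : Int × Int :=
  let in_same_column := head_x == tail_x
  let in_same_row := head_y == tail_y
  let allowed_moves : List (Int → Int → Int × Int) :=
    if in_same_row then
      [fun x y => (x + 1, y), fun x y => (x - 1, y)]                 -- HORIZONTAL_MOVES R, L
    else if in_same_column then
      [fun x y => (x, y + 1), fun x y => (x, y - 1)]                 -- VERTICAL_MOVES U, D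
    else
      [fun x y => (x + 1, y + 1), fun x y => (x - 1, y + 1),
       fun x y => (x + 1, y - 1), fun x y => (x - 1, y - 1)]         -- DIAGONAL_MOVES UR, UL, DR, DL
  fapLoop head_x head_y tail_x tail_y allowed_moves

-- ===== PORT B =====
def find_adjacent_position_alt (head_x : Int) (head_y : Int) (tail_x : Int) (tail_y : Int) : Int × Int :=
  let dx := head_x - tail_x
  let dy := head_y - tail_y
  if 2 < |dx| ∨ 2 < |dy| then (0, 0)   -- raise ValueError (outside Pre_)
  else if dy = 0 then (tail_x + (if 0 ≤ dx then 1 else -1), tail_y)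
  else if dx = 0 then (tail_x, tail_y + (if 0 < dy then 1 else -1))
  else (tail_x + (if 0 < dx then 1 else -1), tail_y + (if 0 < dy then 1 else -1))

-- ===== PRECONDITION & SPEC =====
-- Pre_ is exactly the set of inputs where A returns (head within Chebyshev distance 2 of the tail);
-- outside it A raises ValueError (and so does B).
def Pre_find_adjacent_position (head_x : Int) (head_y : Int) (tail_x : Int) (tail_y : Int) : Prop :=
  |head_x - tail_x| ≤ 2 ∧ |head_y - tail_y| ≤ 2
instance (head_x : Int) (head_y : Int) (tail_x : Int) (tail_y : Int) : Decidable (Pre_find_adjacent_position head_x head_y tail_x tail_y) := by unfold Pre_find_adjacent_position; infer_instance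

def pvWitness_find_adjacent_position : Int × Int × Int × Int := (3, 1, 1, 2)

def Spec_find_adjacent_position (head_x : Int) (head_y : Int) (tail_x : Int) (tail_y : Int) (out : Int × Int) : Prop := out = find_adjacent_position_alt head_x head_y tail_x tail_y
instance (head_x : Int) (head_y : Int) (tail_x : Int) (tail_y : Int) (out : Int × Int) : Decidable (Spec_find_adjacent_position head_x head_y tail_x tail_y out) := by unfold Spec_find_adjacent_position; infer_instance

-- ===== CLAIM (what is proved, stated in full; the proofs are below) =====
def Claim_equal_find_adjacent_position : Prop := ∀ (head_x : Int) (head_y : Int) (tail_x : Int) (tail_y : Int), Dom_find_adjacent_position head_x head_y tail_x tail_y → Pre_find_adjacent_position head_x head_y tail_x tail_y → Spec_find_adjacent_position head_x head_y tail_x tail_y (find_adjacent_position head_x head_y tail_x tail_y)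

-- ===== LEMMAS AND PROOFS =====

theorem fap_key (tx ty dx dy : Int) (h1 : -2 ≤ dx) (h1' : dx ≤ 2) (h2 : -2 ≤ dy) (h2' : dy ≤ 2) :
    find_adjacent_position (tx + dx) (ty + dy) tx ty
      = find_adjacent_position_alt (tx + dx) (ty + dy) tx ty := by
  interval_cases dx <;> interval_cases dy <;>
    simp [find_adjacent_position, find_adjacent_position_alt, fapLoop, tail_adjacent_to_head] <;>
    split_ifs <;> first | rfl | omega

-- ===== VERDICT (by name: the statement is the Claim_ definition above) =====
theorem find_adjacent_position_spec : Claim_equal_find_adjacent_position := by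
  intro hx hy tx ty _ hpre
  obtain ⟨h1, h2⟩ := hpre
  rw [abs_le] at h1 h2
  have hkey := fap_key tx ty (hx - tx) (hy - ty) h1.1 h1.2 h2.1 h2.2
  have ex : tx + (hx - tx) = hx := by ring
  have ey : ty + (hy - ty) = hy := by ring
  rw [ex, ey] at hkey
  exact hkey
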